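-- pv_equiv track=rewrite | github.com/vicsofr/sibdev_test | deals/utils.py | gems_by_two_more_clients
-- ===== SOURCE A (Python) =====
-- def gems_by_two_more_clients(top_5_gems_list: list) -> list:
--     """
--     Takes list of aggregated gems from top 5 clients queryset and returns new list without gems that bought by less
--     than 2 different clients
--     """
--     for row_num, gems in enumerate(top_5_gems_list):
--         for_delete = []
--         list_copy = top_5_gems_list.copy()
--         list_copy.pop(row_num)
--         beside = set([y for x in list_copy for y in x])
--         for gem in gems:
--             if gem not in beside:
--                 for_delete.append(gem)
--         for item in for_delete:
--             top_5_gems_list[row_num].remove(item)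
--     return top_5_gems_list
-- ===== SOURCE B (Python) =====
-- def gems_by_two_more_clients(top_5_gems_list: list) -> list:
--     """
--     One counting pass: cnt[g] = number of rows containing g (each row counted
--     once); then each row is filtered in place keeping gems with cnt >= 2.
--     """
--     cnt = {}
--     for row in top_5_gems_list:
--         for g in dict.fromkeys(row):
--             cnt[g] = cnt.get(g, 0) + 1
--     for row in top_5_gems_list:
--         row[:] = [g for g in row if cnt[g] >= 2]
--     return top_5_gems_list
-- ===== Notes on version B (the rewrite author's own statement) =====
-- stated objective: faster
-- what changed: A rebuilds, for every row, the set of all gems in all other rows (copy + pop + flatten) and then removes losers one by one with list.remove; B makes one counting pass (rows containing each gem) and filters every row by count>=2 in a second pass.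
import Mathlib
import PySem

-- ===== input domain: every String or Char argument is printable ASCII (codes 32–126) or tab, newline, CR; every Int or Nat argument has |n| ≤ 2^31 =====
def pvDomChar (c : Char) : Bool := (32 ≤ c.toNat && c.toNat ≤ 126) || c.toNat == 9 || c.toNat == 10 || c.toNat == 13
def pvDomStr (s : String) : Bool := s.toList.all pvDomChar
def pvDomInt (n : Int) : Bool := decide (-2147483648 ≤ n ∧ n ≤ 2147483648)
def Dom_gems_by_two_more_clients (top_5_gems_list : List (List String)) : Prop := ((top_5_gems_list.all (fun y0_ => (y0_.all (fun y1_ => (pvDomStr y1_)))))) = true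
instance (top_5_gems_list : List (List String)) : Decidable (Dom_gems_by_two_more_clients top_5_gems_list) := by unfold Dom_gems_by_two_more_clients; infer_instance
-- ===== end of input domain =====

-- B replaces A's per-row copy/pop/flatten-set rebuild with one counting pass and a filter pass (asymptotically faster).
-- Both Pythons mutate the argument in place; the equivalence proved here is about the RETURN value.
-- ===== PORT A =====
def gems_by_two_more_clients (top_5_gems_list : List (List String)) : List (List String) :=
  (List.range top_5_gems_list.length).foldl (fun s rowNum =>
    let gems := s.getD rowNum []
    let listCopy := (((PySem.List.pop? s (rowNum : Int))).map Prod.snd).getD s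
    let beside := PySem.Set.ofList (listCopy.flatMap (fun x => x))
    let forDelete := gems.filter (fun gem => !(PySem.Set.contains beside gem))
    let newRow := forDelete.foldl (fun r item => (PySem.List.remove? r item).getD r) gems
    s.set rowNum newRow) top_5_gems_list

-- ===== PORT B =====
def gems_by_two_more_clients_alt (top_5_gems_list : List (List String)) : List (List String) :=
  let cnt := top_5_gems_list.foldl
    (fun d row => (PySem.List.dedup row).foldl (fun d g => d.insert g (d.getD g 0 + 1)) d)
    (PySem.Dict.empty : PySem.Dict String Int)
  top_5_gems_list.map (fun row => row.filter (fun g => decide (2 ≤ cnt.getD g 0)))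

-- ===== PRECONDITION & SPEC =====
def Spec_gems_by_two_more_clients (top_5_gems_list : List (List String)) (out : List (List String)) : Prop := out = gems_by_two_more_clients_alt top_5_gems_list
instance (top_5_gems_list : List (List String)) (out : List (List String)) : Decidable (Spec_gems_by_two_more_clients top_5_gems_list out) := by unfold Spec_gems_by_two_more_clients; infer_instance

-- ===== CLAIM (what is proved, stated in full; the proofs are below) =====
def Claim_equal_gems_by_two_more_clients : Prop := ∀ (top_5_gems_list : List (List String)), Dom_gems_by_two_more_clients top_5_gems_list → Spec_gems_by_two_more_clients top_5_gems_list (gems_by_two_more_clients top_5_gems_list)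

-- ===== LEMMAS AND PROOFS =====

-- the gem-keeping predicate both programs implement: g occurs in at least 2 rows
def pvKeep (l : List (List String)) (g : String) : Bool :=
  decide (2 ≤ l.countP (fun row => row.contains g))

def pvF (l : List (List String)) (row : List String) : List String := row.filter (pvKeep l)

-- A's loop body, named for the proofs (definitionally the lambda in the port)
def pvBodyA (s : List (List String)) (rowNum : Nat) : List (List String) :=
  let gems := s.getD rowNum []
  let listCopy := (((PySem.List.pop? s (rowNum : Int))).map Prod.snd).getD s
  let beside := PySem.Set.ofList (listCopy.flatMap (fun x => x))
  let forDelete := gems.filter (fun gem => !(PySem.Set.contains beside gem))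
  let newRow := forDelete.foldl (fun r item => (PySem.List.remove? r item).getD r) gems
  s.set rowNum newRow

theorem pvA_eq_foldl (l : List (List String)) :
    gems_by_two_more_clients l = (List.range l.length).foldl pvBodyA l := rfl

-- removing, in order, every ¬p-occurrence from gems (first occurrence each time) leaves gems.filter p
theorem pv_remove_cons (del : List String) (x : String) (r : List String)
    (h : ∀ y ∈ del, y ≠ x) :
    del.foldl (fun r item => (PySem.List.remove? r item).getD r) (x :: r)
      = x :: del.foldl (fun r item => (PySem.List.remove? r item).getD r) r := by
  induction del generalizing r with
  | nil => rfl
  | cons y ys ih =>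
    have hy : x ≠ y := fun e => h y (by simp) e.symm
    simp only [List.foldl_cons]
    have hstep : (PySem.List.remove? (x :: r) y).getD (x :: r)
        = x :: (PySem.List.remove? r y).getD r := by
      rw [PySem.List.remove?_cons_of_ne r hy]
      cases PySem.List.remove? r y <;> simp
    rw [hstep, ih _ (fun z hz => h z (by simp [hz]))]

theorem pv_remove_filter (gems : List String) (p : String → Bool) :
    (gems.filter (fun g => !p g)).foldl (fun r item => (PySem.List.remove? r item).getD r) gems
      = gems.filter p := by
  induction gems with
  | nil => rfl
  | cons g gs ih =>
    by_cases hp : p g = true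
    · have hdel : (List.filter (fun g => !p g) (g :: gs)) = gs.filter (fun g => !p g) := by
        simp [hp]
      rw [hdel, pv_remove_cons _ _ _ ?_, ih, List.filter_cons, hp]
      · simp
      · intro y hy e
        have := List.of_mem_filter hy
        rw [e] at this; simp [hp] at this
    · have hpg : p g = false := by simpa using hp
      have hdel : (List.filter (fun g => !p g) (g :: gs)) = g :: gs.filter (fun g => !p g) := by
        simp [hpg]
      rw [hdel]
      simp only [List.foldl_cons, PySem.List.remove?_cons_self, Option.getD_some]
      rw [ih, List.filter_cons, hpg]
      simp

-- B's counter really counts the rows containing g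
theorem pv_cnt_getD (l : List (List String)) (d : PySem.Dict String Int) (g : String) :
    (l.foldl (fun d row => (PySem.List.dedup row).foldl
        (fun d g => d.insert g (d.getD g 0 + 1)) d) d).getD g 0
      = d.getD g 0 + (l.countP (fun row => row.contains g) : Int) := by
  induction l generalizing d with
  | nil => simp
  | cons row rest ih =>
    simp only [List.foldl_cons, List.countP_cons]
    rw [ih, PySem.Dict.getD_foldl_insert_add_one]
    have hcount : (PySem.List.dedup row).count g = if row.contains g then 1 else 0 := by
      by_cases hm : g ∈ row
      · rw [List.count_eq_one_of_mem (PySem.List.nodup_dedup row) (by rw [PySem.List.mem_dedup]; exact hm)]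
        simp [hm]
      · rw [List.count_eq_zero.2 (by simpa [PySem.List.mem_dedup] using hm)]
        simp [hm]
    rw [hcount]
    split_ifs <;> simp <;> omega

-- membership in A's "beside" set equals pvKeep, for gems of the current (original) row
theorem pv_beside (l : List (List String)) (i : Nat) (hi : i < l.length) (g : String)
    (hg : g ∈ l[i]) :
    (g ∈ ((l.take i).map (pvF l) ++ l.drop (i + 1)).flatMap (fun x => x))
      ↔ pvKeep l g = true := by
  have hdecomp : l = l.take i ++ l[i] :: l.drop (i + 1) := by
    conv_lhs => rw [← List.take_append_drop i l]
    rw [List.drop_eq_getElem_cons hi]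
  have hci : l[i].contains g = true := by simpa [List.contains_iff_mem] using hg
  have hcnt : l.countP (fun row => row.contains g)
      = (l.take i).countP (fun row => row.contains g) + 1
        + (l.drop (i + 1)).countP (fun row => row.contains g) := by
    have h1 : l.countP (fun row => row.contains g)
        = (l.take i).countP (fun row => row.contains g)
          + (l[i] :: l.drop (i + 1)).countP (fun row => row.contains g) := by
      conv_lhs => rw [hdecomp]
      exact List.countP_append
    rw [h1, List.countP_cons]
    simp only [hci, if_pos]
    omega
  constructor
  · intro hmem
    rcases List.mem_flatMap.1 hmem with ⟨row, hrow, hgr⟩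
    rcases List.mem_append.1 hrow with hT | hD
    · rcases List.mem_map.1 hT with ⟨r, _, rfl⟩
      exact (List.mem_filter.1 hgr).2
    · have h1 : 0 < (l.drop (i + 1)).countP (fun row => row.contains g) :=
        List.countP_pos_iff.2 ⟨row, hD, by simpa [List.contains_iff_mem] using hgr⟩
      simp only [pvKeep, decide_eq_true_eq]
      omega
  · intro hkeep
    have h2 : 2 ≤ l.countP (fun row => row.contains g) := by
      simpa [pvKeep] using hkeep
    apply List.mem_flatMap.2
    by_cases hT : 0 < (l.take i).countP (fun row => row.contains g)
    · rcases List.countP_pos_iff.1 hT with ⟨r, hr, hgr⟩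
      exact ⟨pvF l r, List.mem_append_left _ (List.mem_map.2 ⟨r, hr, rfl⟩),
        List.mem_filter.2 ⟨by simpa [List.contains_iff_mem] using hgr, hkeep⟩⟩
    · have hD : 0 < (l.drop (i + 1)).countP (fun row => row.contains g) := by omega
      rcases List.countP_pos_iff.1 hD with ⟨r, hr, hgr⟩
      exact ⟨r, List.mem_append_right _ hr, by simpa [List.contains_iff_mem] using hgr⟩

-- one step of A's loop filters row i by pvKeep, given rows < i already filtered
theorem pv_stepA (l : List (List String)) (i : Nat) (hi : i < l.length) :
    pvBodyA ((l.take i).map (pvF l) ++ l.drop i) i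
      = (l.take (i + 1)).map (pvF l) ++ l.drop (i + 1) := by
  have hlen : ((l.take i).map (pvF l)).length = i := by
    simp [List.length_take, Nat.min_eq_left (Nat.le_of_lt hi)]
  have hdrop : l.drop i = l[i] :: l.drop (i + 1) := List.drop_eq_getElem_cons hi
  have hgetD : ((l.take i).map (pvF l) ++ l.drop i).getD i [] = l[i] := by
    rw [List.getD_eq_getElem?_getD, List.getElem?_append_right (by omega), hlen,
      Nat.sub_self, hdrop]
    rfl
  have hslen : i < ((l.take i).map (pvF l) ++ l.drop i).length := by
    rw [List.length_append, hlen, List.length_drop]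
    omega
  have herase : ((l.take i).map (pvF l) ++ l.drop i).eraseIdx i
      = (l.take i).map (pvF l) ++ l.drop (i + 1) := by
    rw [List.eraseIdx_append_of_length_le (by omega) _, hlen, Nat.sub_self, hdrop,
      List.eraseIdx_cons_zero]
  have hcopy : ((PySem.List.pop? ((l.take i).map (pvF l) ++ l.drop i) (i : Int)).map
        Prod.snd).getD ((l.take i).map (pvF l) ++ l.drop i)
      = (l.take i).map (pvF l) ++ l.drop (i + 1) := by
    rw [PySem.List.pop?_natCast _ i hslen, Option.map_some, Option.getD_some, herase]
  have hset : ∀ newRow : List String,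
      ((l.take i).map (pvF l) ++ l.drop i).set i newRow
        = (l.take i).map (pvF l) ++ newRow :: l.drop (i + 1) := by
    intro newRow
    rw [List.set_append_right _ _ (by omega), hlen, Nat.sub_self, hdrop,
      List.set_cons_zero]
  unfold pvBodyA
  simp only [hgetD, hcopy, hset]
  have hfilt : (l[i].filter fun gem =>
      !(PySem.Set.contains (PySem.Set.ofList
        (((l.take i).map (pvF l) ++ l.drop (i + 1)).flatMap (fun x => x))) gem))
      = l[i].filter (fun gem => !(pvKeep l gem)) := by
    apply List.filter_congr
    intro g hg
    have hiff := pv_beside l i hi g hg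
    have hmemiff : PySem.Set.contains (PySem.Set.ofList
        (((l.take i).map (pvF l) ++ l.drop (i + 1)).flatMap (fun x => x))) g = true
        ↔ g ∈ (((l.take i).map (pvF l) ++ l.drop (i + 1)).flatMap (fun x => x)) := by
      simp [PySem.Set.contains, PySem.Set.mem_ofList]
    have hc : PySem.Set.contains (PySem.Set.ofList
        (((l.take i).map (pvF l) ++ l.drop (i + 1)).flatMap (fun x => x))) g
        = pvKeep l g := Bool.eq_iff_iff.mpr (hmemiff.trans hiff)
    rw [hc]
  rw [hfilt, pv_remove_filter]
  have htake : List.take (i + 1) l = List.take i l ++ [l[i]] := by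
    rw [List.take_add_one, List.getElem?_eq_getElem hi]
    rfl
  rw [htake, List.map_append]
  simp [pvF]

theorem pv_foldA (l : List (List String)) :
    ∀ (k i : Nat), i + k = l.length →
    (List.range' i k).foldl pvBodyA ((l.take i).map (pvF l) ++ l.drop i)
      = l.map (pvF l) := by
  intro k
  induction k with
  | zero =>
    intro i hik
    simp only [List.range', List.foldl_nil]
    rw [List.take_of_length_le (by omega), List.drop_of_length_le (by omega)]
    simp
  | succ k ih =>
    intro i hik
    rw [List.range'_succ, List.foldl_cons, pv_stepA l i (by omega)]
    exact ih (i + 1) (by omega)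

-- ===== VERDICT (by name: the statement is the Claim_ definition above) =====
theorem gems_by_two_more_clients_spec : Claim_equal_gems_by_two_more_clients := by
  intro l _
  unfold Spec_gems_by_two_more_clients
  have hA : gems_by_two_more_clients l = l.map (pvF l) := by
    rw [pvA_eq_foldl, List.range_eq_range']
    have := pv_foldA l l.length 0 (by omega)
    simpa using this
  have hB : gems_by_two_more_clients_alt l = l.map (pvF l) := by
    unfold gems_by_two_more_clients_alt
    apply List.map_congr_left
    intro row _
    apply List.filter_congr
    intro g _
    simp only [pv_cnt_getD, PySem.Dict.getD_empty, zero_add, pvKeep]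
    rw [decide_eq_decide]
    exact_mod_cast Iff.rfl
  rw [hA, hB]
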